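-- pv_equiv track=rewrite | github.com/gabi2605k/GOA | level 52/homework/hw2.py | categorize_numbers
-- ===== SOURCE A (Python) =====
-- def categorize_numbers(lst):
--     positive = 0
--     negative = 0
--     zero = 0
--     for num in lst:
--         if num > 0:
--             positive += 1
--         elif num < 0:
--             negative += 1
--         else:
--             zero += 1
--
--     return positive, negative, zero
-- ===== SOURCE B (Python) =====
-- def categorize_numbers(lst):
--     positive = sum(1 for x in lst if x > 0)
--     negative = sum(1 for x in lst if x < 0)
--     return positive, negative, len(lst) - positive - negative
-- ===== Notes on version B (the rewrite author's own statement) =====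
-- stated objective: idiomatic
-- what changed: Replaces the single interleaved branching loop with two aggregate comprehension sums (positive and negative) and derives the zero count arithmetically as len - positive - negative.
import Mathlib
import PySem

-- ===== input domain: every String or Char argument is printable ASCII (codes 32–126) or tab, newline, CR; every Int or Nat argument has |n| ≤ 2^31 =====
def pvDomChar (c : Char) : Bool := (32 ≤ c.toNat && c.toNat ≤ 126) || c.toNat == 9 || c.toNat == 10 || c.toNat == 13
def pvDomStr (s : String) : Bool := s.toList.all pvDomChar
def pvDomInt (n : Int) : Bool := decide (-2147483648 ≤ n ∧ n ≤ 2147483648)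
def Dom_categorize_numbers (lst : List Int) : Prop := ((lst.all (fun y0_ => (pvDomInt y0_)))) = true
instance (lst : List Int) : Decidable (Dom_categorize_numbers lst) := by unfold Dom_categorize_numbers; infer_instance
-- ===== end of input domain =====

-- B computes positive and negative as two separate filtered sums and derives zero as len - positive - negative (no behavioural change; same cost).

-- ===== PORT A =====
-- one loop, three counters updated by branches
def categorize_numbers (lst : List Int) : Int × Int × Int :=
  let s := lst.foldl (fun (acc : Int × Int × Int) num =>
    if num > 0 then (acc.1 + 1, acc.2.1, acc.2.2)
    else if num < 0 then (acc.1, acc.2.1 + 1, acc.2.2)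
    else (acc.1, acc.2.1, acc.2.2 + 1)) (0, 0, 0)
  s

-- ===== PORT B =====
-- sum(1 for x in lst if x > 0) ported as a fold adding 1 under the filter condition
def categorize_numbers_alt (lst : List Int) : Int × Int × Int :=
  let positive : Int := lst.foldl (fun a x => if x > 0 then a + 1 else a) 0
  let negative : Int := lst.foldl (fun a x => if x < 0 then a + 1 else a) 0
  (positive, negative, (lst.length : Int) - positive - negative)

-- ===== PRECONDITION & SPEC =====
def Spec_categorize_numbers (lst : List Int) (out : Int × Int × Int) : Prop := out = categorize_numbers_alt lst
instance (lst : List Int) (out : Int × Int × Int) : Decidable (Spec_categorize_numbers lst out) := by unfold Spec_categorize_numbers; infer_instance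

-- ===== CLAIM (what is proved, stated in full; the proofs are below) =====
def Claim_equal_categorize_numbers : Prop := ∀ (lst : List Int), Dom_categorize_numbers lst → Spec_categorize_numbers lst (categorize_numbers lst)

-- ===== LEMMAS AND PROOFS =====

-- shifting the accumulator of the positive-counting fold
lemma shift_pos (t : List Int) (b : Int) :
    t.foldl (fun a x => if x > 0 then a + 1 else a) b
    = b + t.foldl (fun a x => if x > 0 then a + 1 else a) 0 := by
  induction t generalizing b with
  | nil => simp
  | cons h' t' ih' =>
    simp only [List.foldl]
    rw [ih' (if h' > 0 then b + 1 else b), ih' (if h' > 0 then (0:Int) + 1 else 0)]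
    split <;> ring

-- shifting the accumulator of the negative-counting fold
lemma shift_neg (t : List Int) (b : Int) :
    t.foldl (fun a x => if x < 0 then a + 1 else a) b
    = b + t.foldl (fun a x => if x < 0 then a + 1 else a) 0 := by
  induction t generalizing b with
  | nil => simp
  | cons h' t' ih' =>
    simp only [List.foldl]
    rw [ih' (if h' < 0 then b + 1 else b), ih' (if h' < 0 then (0:Int) + 1 else 0)]
    split <;> ring

-- Invariant: A's fold from any start equals componentwise B's counts plus the start.
lemma categorize_loop (lst : List Int) (p n z : Int) :
    lst.foldl (fun (acc : Int × Int × Int) num =>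
      if num > 0 then (acc.1 + 1, acc.2.1, acc.2.2)
      else if num < 0 then (acc.1, acc.2.1 + 1, acc.2.2)
      else (acc.1, acc.2.1, acc.2.2 + 1)) (p, n, z)
    = (p + lst.foldl (fun a x => if x > 0 then a + 1 else a) 0,
       n + lst.foldl (fun a x => if x < 0 then a + 1 else a) 0,
       z + ((lst.length : Int)
            - lst.foldl (fun a x => if x > 0 then a + 1 else a) 0
            - lst.foldl (fun a x => if x < 0 then a + 1 else a) 0)) := by
  induction lst generalizing p n z with
  | nil => simp
  | cons h t ih =>
    simp only [List.foldl, List.length_cons]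
    by_cases h1 : h > 0
    · have h2 : ¬ h < 0 := by omega
      simp only [if_pos h1, if_neg h2]
      rw [ih, shift_pos t ((0:Int) + 1)]
      simp only [Prod.mk.injEq]
      refine ⟨?_, ?_, ?_⟩ <;> push_cast <;> first | rfl | ring
    · by_cases h2 : h < 0
      · simp only [if_neg h1, if_pos h2]
        rw [ih, shift_neg t ((0:Int) + 1)]
        simp only [Prod.mk.injEq]
        refine ⟨?_, ?_, ?_⟩ <;> push_cast <;> first | rfl | ring
      · simp only [if_neg h1, if_neg h2]
        rw [ih]
        simp only [Prod.mk.injEq]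
        refine ⟨?_, ?_, ?_⟩ <;> push_cast <;> first | rfl | ring

-- ===== VERDICT (by name: the statement is the Claim_ definition above) =====
theorem categorize_numbers_spec : Claim_equal_categorize_numbers := by
  intro lst _
  show categorize_numbers lst = categorize_numbers_alt lst
  unfold categorize_numbers categorize_numbers_alt
  rw [categorize_loop]
  simp
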